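-- pv_equiv track=rewrite | github.com/Mabharathkumar/SKPYI-155-python-phase1TASKS-SKILLRAACE | python/TASK 1B.2.py | remove_common_characters
-- ===== SOURCE A (Python) =====
-- def remove_common_characters(name1, name2):
--     list1 = list(name1)
--     list2 = list(name2)
--     for char in list1[:]:
--         if char in list2:
--             list1.remove(char)
--             list2.remove(char)
--     return list1, list2
-- ===== SOURCE B (Python) =====
-- def remove_common_characters(name1, name2):
--     def counts(s):
--         d = {}
--         for ch in s:
--             d[ch] = d.get(ch, 0) + 1
--         return d
--
--     def strip(s, budget):
--         out = []
--         for ch in s: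
--             if budget.get(ch, 0) > 0:
--                 budget[ch] -= 1
--             else:
--                 out.append(ch)
--         return out
--
--     return strip(name1, counts(name2)), strip(name2, counts(name1))
-- ===== Notes on version B (the rewrite author's own statement) =====
-- stated objective: faster
-- what changed: Replaces A's repeated list scans with in-place removal (each 'in' test and .remove is a linear scan) by building a character-count dict for the other string once and doing one budgeted linear pass over each string.
import Mathlib
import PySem

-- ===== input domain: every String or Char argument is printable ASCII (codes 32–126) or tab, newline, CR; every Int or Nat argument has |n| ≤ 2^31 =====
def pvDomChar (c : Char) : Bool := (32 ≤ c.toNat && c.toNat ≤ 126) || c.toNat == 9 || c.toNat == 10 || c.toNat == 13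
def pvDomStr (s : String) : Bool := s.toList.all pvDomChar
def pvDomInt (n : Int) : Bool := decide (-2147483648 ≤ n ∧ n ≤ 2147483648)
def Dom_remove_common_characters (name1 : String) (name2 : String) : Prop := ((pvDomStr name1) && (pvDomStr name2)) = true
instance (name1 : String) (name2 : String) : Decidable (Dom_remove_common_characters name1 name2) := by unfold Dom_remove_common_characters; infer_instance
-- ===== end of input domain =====

-- B replaces A's quadratic scan-and-remove loop with a counter dict and one budgeted linear pass per string (faster: O(n+m) vs O(n*m)).


-- ===== PORT A =====
-- Hand port of Python's list.remove(c): exact whenever c is present in the list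
-- (in A's loop the removed char is always present: 'char in list2' is tested, and
-- presence in list1 is a loop invariant since char was drawn from a copy of list1).
def pvRemoveFirst (c : Char) : List Char → List Char
  | [] => []
  | x :: xs => if x = c then xs else x :: pvRemoveFirst c xs

def pvStepA (st : List Char × List Char) (ch : Char) : List Char × List Char :=
  if st.2.contains ch then (pvRemoveFirst ch st.1, pvRemoveFirst ch st.2) else st

def remove_common_characters (name1 : String) (name2 : String) : List String × List String :=
  let list1 := name1.toList
  let list2 := name2.toList
  -- 'for char in list1[:]' iterates over the unmodified copy of list1
  let st := list1.foldl pvStepA (list1, list2)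
  (st.1.map (fun c => String.ofList [c]), st.2.map (fun c => String.ofList [c]))

-- ===== PORT B =====
-- counts(s): d[ch] = d.get(ch, 0) + 1 over s
def pvCounts (s : List Char) : PySem.Dict Char Int :=
  s.foldl (fun d ch => d.insert ch (d.getD ch 0 + 1)) PySem.Dict.empty

-- strip(s, budget): one pass, decrement budget or append to out
def pvStrip (s : List Char) (budget : PySem.Dict Char Int) : List Char :=
  (s.foldl (fun (st : List Char × PySem.Dict Char Int) ch =>
      if 0 < st.2.getD ch 0 then (st.1, st.2.insert ch (st.2.getD ch 0 - 1))
      else (st.1 ++ [ch], st.2)) ([], budget)).1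

def remove_common_characters_alt (name1 : String) (name2 : String) : List String × List String :=
  let l1 := name1.toList
  let l2 := name2.toList
  ((pvStrip l1 (pvCounts l2)).map (fun c => String.ofList [c]),
   (pvStrip l2 (pvCounts l1)).map (fun c => String.ofList [c]))

-- ===== PRECONDITION & SPEC =====
def Spec_remove_common_characters (name1 : String) (name2 : String) (out : List String × List String) : Prop := out = remove_common_characters_alt name1 name2
instance (name1 : String) (name2 : String) (out : List String × List String) : Decidable (Spec_remove_common_characters name1 name2 out) := by unfold Spec_remove_common_characters; infer_instance

-- ===== CLAIM (what is proved, stated in full; the proofs are below) =====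
def Claim_equal_remove_common_characters : Prop := ∀ (name1 : String) (name2 : String), Dom_remove_common_characters name1 name2 → Spec_remove_common_characters name1 name2 (remove_common_characters name1 name2)

-- ===== LEMMAS AND PROOFS =====

-- Common abstraction: keep s m drops, left to right, each char while its budget m is positive.
def pvKeep : List Char → (Char → Int) → List Char
  | [], _ => []
  | c :: cs, m => if 0 < m c then pvKeep cs (fun d => if d = c then m d - 1 else m d) else c :: pvKeep cs m

theorem pvKeep_cons_pos (x : Char) (xs : List Char) (m : Char → Int) (h : 0 < m x) :
    pvKeep (x :: xs) m = pvKeep xs (fun d => if d = x then m d - 1 else m d) := by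
  simp [pvKeep, h]

theorem pvKeep_cons_neg (x : Char) (xs : List Char) (m : Char → Int) (h : ¬ 0 < m x) :
    pvKeep (x :: xs) m = x :: pvKeep xs m := by
  simp [pvKeep, h]

theorem removeFirst_cons_self (c : Char) (xs : List Char) : pvRemoveFirst c (c :: xs) = xs := by
  simp [pvRemoveFirst]

theorem removeFirst_cons_ne (c x : Char) (xs : List Char) (h : ¬ x = c) :
    pvRemoveFirst c (x :: xs) = x :: pvRemoveFirst c xs := by
  simp [pvRemoveFirst, h]

theorem pvKeep_nonpos (s : List Char) (m : Char → Int) (h : ∀ c, m c ≤ 0) : pvKeep s m = s := by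
  induction s with
  | nil => rfl
  | cons x xs ih =>
      rw [pvKeep_cons_neg x xs m (by have := h x; omega)]
      exact congrArg _ ih

theorem count_cons_cast (x c : Char) (xs : List Char) :
    (((x :: xs).count c : Int)) = (xs.count c : Int) + (if x = c then 1 else 0) := by
  by_cases h : x = c
  · subst h; rw [List.count_cons_self]; simp
  · rw [List.count_cons_of_ne h]; simp [h]

theorem pvKeep_congr (s : List Char) (m m' : Char → Int)
    (h : ∀ c, m c = m' c ∨ ((s.count c : Int) ≤ m c ∧ (s.count c : Int) ≤ m' c)) :
    pvKeep s m = pvKeep s m' := by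
  induction s generalizing m m' with
  | nil => rfl
  | cons x xs ih =>
      have hcx : ∀ c, ((x :: xs).count c : Int) = (xs.count c : Int) + (if x = c then 1 else 0) :=
        fun c => count_cons_cast x c xs
      have hx : 0 < m x ↔ 0 < m' x := by
        rcases h x with h1 | ⟨h1, h2⟩
        · rw [h1]
        · have hh := hcx x
          rw [if_pos rfl] at hh
          have hnn : (0:Int) ≤ (xs.count x : Int) := by positivity
          constructor <;> intro <;> omega
      by_cases hbx : 0 < m x
      · rw [pvKeep_cons_pos x xs m hbx, pvKeep_cons_pos x xs m' (hx.mp hbx)]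
        refine ih _ _ ?_
        intro c
        rcases h c with h1 | ⟨h1, h2⟩
        · left; rw [h1]
        · right
          have hh := hcx c
          by_cases hc : c = x
          · subst hc
            rw [if_pos rfl] at hh
            constructor <;> (rw [if_pos rfl]; omega)
          · rw [if_neg (fun hh2 : x = c => hc hh2.symm)] at hh
            constructor <;> (rw [if_neg hc]; omega)
      · rw [pvKeep_cons_neg x xs m hbx, pvKeep_cons_neg x xs m' (fun hcon => hbx (hx.mpr hcon))]
        refine congrArg _ (ih _ _ ?_)
        intro c
        rcases h c with h1 | ⟨h1, h2⟩
        · left; exact h1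
        · right
          have hh := hcx c
          have h3 : (xs.count c : Int) ≤ ((x :: xs).count c : Int) := by
            rw [hh]; split_ifs <;> omega
          exact ⟨le_trans h3 h1, le_trans h3 h2⟩

theorem count_removeFirst_ne (c ch : Char) (b : List Char) (h : c ≠ ch) :
    (pvRemoveFirst ch b).count c = b.count c := by
  induction b with
  | nil => rfl
  | cons x xs ih =>
      by_cases hx : x = ch
      · subst hx
        rw [removeFirst_cons_self]
        exact (List.count_cons_of_ne (Ne.symm h)).symm
      · rw [removeFirst_cons_ne ch x xs hx]
        by_cases hxc : x = c
        · subst hxc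
          rw [List.count_cons_self, List.count_cons_self, ih]
        · rw [List.count_cons_of_ne hxc, List.count_cons_of_ne hxc, ih]

theorem count_removeFirst_self (ch : Char) (b : List Char) (h : ch ∈ b) :
    (pvRemoveFirst ch b).count ch + 1 = b.count ch := by
  induction b with
  | nil => cases h
  | cons x xs ih =>
      by_cases hx : x = ch
      · subst hx
        rw [removeFirst_cons_self, List.count_cons_self]
      · rw [removeFirst_cons_ne ch x xs hx]
        have hm : ch ∈ xs := by
          cases h with
          | head => exact absurd rfl hx
          | tail _ h => exact h
        rw [List.count_cons_of_ne hx, List.count_cons_of_ne hx]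
        exact ih hm

-- removing the first ch then keeping with budget m = keeping with the budget bumped at ch (needs 0 ≤ m ch)
theorem pvKeep_removeFirst (ch : Char) (a : List Char) (m : Char → Int) (hm : 0 ≤ m ch) :
    pvKeep (pvRemoveFirst ch a) m = pvKeep a (fun d => if d = ch then m d + 1 else m d) := by
  induction a generalizing m with
  | nil => rfl
  | cons x xs ih =>
      by_cases hx : x = ch
      · subst hx
        rw [removeFirst_cons_self]
        rw [pvKeep_cons_pos x xs _ (by rw [if_pos rfl]; omega)]
        refine pvKeep_congr _ _ _ ?_
        intro c
        left
        by_cases hc : c = x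
        · subst hc; simp
        · simp [hc]
      · rw [removeFirst_cons_ne ch x xs hx]
        have hchx : ¬ ch = x := fun hh => hx hh.symm
        by_cases hb : 0 < m x
        · rw [pvKeep_cons_pos x (pvRemoveFirst ch xs) m hb,
              pvKeep_cons_pos x xs _ (by rw [if_neg hx]; exact hb)]
          rw [ih _ (by rw [if_neg hchx]; exact hm)]
          refine pvKeep_congr _ _ _ ?_
          intro c
          left
          by_cases hc : c = ch
          · subst hc
            rw [if_pos rfl, if_neg hchx, if_pos rfl, if_neg hchx]
          · by_cases hcx : c = x
            · subst hcx
              rw [if_neg hc, if_pos rfl, if_pos rfl, if_neg hc]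
            · rw [if_neg hc, if_neg hcx, if_neg hcx, if_neg hc]
        · rw [pvKeep_cons_neg x (pvRemoveFirst ch xs) m hb,
              pvKeep_cons_neg x xs _ (by rw [if_neg hx]; exact hb)]
          exact congrArg _ (ih m hm)

-- invariant of A's loop: the budget already spent is min(chars iterated so far, current list2 count)
theorem foldA_eq_keep (r : List Char) : ∀ (a b : List Char),
    r.foldl pvStepA (a, b) =
      (pvKeep a (fun c => min (r.count c : Int) (b.count c : Int)),
       pvKeep b (fun c => min (r.count c : Int) (b.count c : Int))) := by
  induction r with
  | nil =>
      intro a b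
      simp only [List.foldl]
      rw [pvKeep_nonpos a _ (by intro c; simp), pvKeep_nonpos b _ (by intro c; simp)]
  | cons ch r' ih =>
      intro a b
      simp only [List.foldl, pvStepA]
      by_cases hb : b.contains ch
      · rw [if_pos hb]
        have hmem : ch ∈ b := by simpa using hb
        rw [ih]
        have hself := count_removeFirst_self ch b hmem
        have hfun : (fun c => if c = ch then
              (min ((r'.count c : Int)) (((pvRemoveFirst ch b).count c : Int))) + 1
              else min ((r'.count c : Int)) (((pvRemoveFirst ch b).count c : Int)))
            = (fun c => min (((ch :: r').count c : Int)) ((b.count c : Int))) := by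
          funext c
          by_cases hc : c = ch
          · subst hc
            rw [if_pos rfl, List.count_cons_self]
            push_cast
            omega
          · rw [if_neg hc, count_removeFirst_ne c ch b hc,
                List.count_cons_of_ne (fun hh : ch = c => hc hh.symm)]
        have hnn : (0:Int) ≤ min ((r'.count ch : Int)) (((pvRemoveFirst ch b).count ch : Int)) := by
          positivity
        have e1 : pvKeep (pvRemoveFirst ch a)
              (fun c => min ((r'.count c : Int)) (((pvRemoveFirst ch b).count c : Int)))
            = pvKeep a (fun c => min (((ch :: r').count c : Int)) ((b.count c : Int))) := by
          rw [pvKeep_removeFirst ch a _ hnn, hfun]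
        have e2 : pvKeep (pvRemoveFirst ch b)
              (fun c => min ((r'.count c : Int)) (((pvRemoveFirst ch b).count c : Int)))
            = pvKeep b (fun c => min (((ch :: r').count c : Int)) ((b.count c : Int))) := by
          rw [pvKeep_removeFirst ch b _ hnn, hfun]
        rw [e1, e2]
      · rw [if_neg hb]
        have hmem : ch ∉ b := by simpa using hb
        have hz : b.count ch = 0 := List.count_eq_zero.mpr hmem
        rw [ih]
        have hfun : (fun c => min ((r'.count c : Int)) ((b.count c : Int)))
            = (fun c => min (((ch :: r').count c : Int)) ((b.count c : Int))) := by
          funext c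
          by_cases hc : c = ch
          · subst hc
            rw [List.count_cons_self, hz]
            push_cast
            omega
          · rw [List.count_cons_of_ne (fun hh : ch = c => hc hh.symm)]
        rw [hfun]

-- B's strip equals pvKeep with the dict read off as a budget function
theorem pvStrip_fold (s : List Char) : ∀ (acc : List Char) (d : PySem.Dict Char Int),
    (s.foldl (fun (st : List Char × PySem.Dict Char Int) ch =>
        if 0 < st.2.getD ch 0 then (st.1, st.2.insert ch (st.2.getD ch 0 - 1))
        else (st.1 ++ [ch], st.2)) (acc, d)).1 = acc ++ pvKeep s (fun c => d.getD c 0) := by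
  induction s with
  | nil => intro acc d; simp [pvKeep]
  | cons ch s' ih =>
      intro acc d
      simp only [List.foldl]
      by_cases hpos : 0 < d.getD ch 0
      · rw [if_pos hpos, pvKeep_cons_pos ch s' _ hpos, ih]
        refine congrArg _ (pvKeep_congr _ _ _ ?_)
        intro c
        left
        rw [PySem.Dict.getD_insert]
        by_cases hc : c = ch <;> simp [hc]
      · rw [if_neg hpos, pvKeep_cons_neg ch s' _ hpos, ih]
        simp

theorem pvStrip_eq_keep (s : List Char) (d : PySem.Dict Char Int) :
    pvStrip s d = pvKeep s (fun c => d.getD c 0) := by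
  unfold pvStrip
  rw [pvStrip_fold s [] d]
  simp

theorem pvCounts_getD (s : List Char) (c : Char) : (pvCounts s).getD c 0 = (s.count c : Int) := by
  unfold pvCounts
  rw [PySem.Dict.getD_foldl_insert_add_one]
  simp

-- a budget of the other string's full counts spends exactly min(count1, count2) per char
theorem strip_eq_keep_min (l1 l2 : List Char) :
    pvStrip l1 (pvCounts l2) = pvKeep l1 (fun c => min ((l1.count c : Int)) ((l2.count c : Int))) := by
  rw [pvStrip_eq_keep]
  refine pvKeep_congr _ _ _ ?_
  intro c
  rw [pvCounts_getD]
  by_cases h : (l2.count c : Int) ≤ (l1.count c : Int)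
  · left; omega
  · right; constructor <;> omega

theorem pvKeep_min_comm (l1 l2 : List Char) :
    pvKeep l2 (fun c => min ((l1.count c : Int)) ((l2.count c : Int)))
      = pvKeep l2 (fun c => min ((l2.count c : Int)) ((l1.count c : Int))) :=
  pvKeep_congr _ _ _ (fun _ => Or.inl (min_comm _ _))

-- ===== VERDICT (by name: the statement is the Claim_ definition above) =====
theorem remove_common_characters_spec : Claim_equal_remove_common_characters := by
  intro name1 name2 _
  unfold Spec_remove_common_characters
  show remove_common_characters name1 name2 = remove_common_characters_alt name1 name2
  unfold remove_common_characters remove_common_characters_alt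
  simp only [foldA_eq_keep, strip_eq_keep_min]
  rw [pvKeep_min_comm]
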